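-- pv_equiv track=rewrite | github.com/casparil/rob-univ | subgroup_sim.py | get_agreement_indices
-- ===== SOURCE A (Python) =====
-- def get_agreement_indices(preds: dict):
--     aggr_indices, disag_indices = {}, {}
--     for model1 in preds.keys():
--         aggr_indices[model1], disag_indices[model1] = {}, {}
--         for model2 in preds.keys():
--             aggr_indices[model1][model2] = []
--             disag_indices[model1][model2] = []
--             if model1 != model2:
--                 for num, i, j in zip(range(len(preds[model1])), preds[model1], preds[model2]):
--                     if i == j:
--                         aggr_indices[model1][model2].append(num)
--                     else:
--                         disag_indices[model1][model2].append(num)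
--     return aggr_indices, disag_indices
-- ===== SOURCE B (Python) =====
-- def get_agreement_indices(preds: dict):
--     ks = list(preds)
--     aggr_indices = {m: {n: [] for n in ks} for m in ks}
--     disag_indices = {m: {n: [] for n in ks} for m in ks}
--     max_len = max((len(v) for v in preds.values()), default=0)
--     for num in range(max_len):
--         # group the models that have a prediction at this index by that prediction
--         buckets = {}
--         for m in ks:
--             row = preds[m]
--             if num < len(row):
--                 buckets.setdefault(row[num], []).append(m)
--         # models in the same bucket agree at this index
--         for ms in buckets.values():
--             for m in ms:
--                 for n in ms:
--                     if m != n: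
--                         aggr_indices[m][n].append(num)
--         # models in different buckets disagree at this index
--         for v1, ms1 in buckets.items():
--             for v2, ms2 in buckets.items():
--                 if v1 != v2:
--                     for m in ms1:
--                         for n in ms2:
--                             disag_indices[m][n].append(num)
--     return aggr_indices, disag_indices
-- ===== Notes on version B (the rewrite author's own statement) =====
-- stated objective: alternative
-- what changed: B is position-major instead of pair-major: for each index it groups the models by their predicted value at that index into value->models buckets, then records the index as agreement for pairs inside one bucket and as disagreement for pairs across different buckets, instead of A's nested loop over ordered model pairs that zips and compares the two prediction lists for every pair.
import Mathlib
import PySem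

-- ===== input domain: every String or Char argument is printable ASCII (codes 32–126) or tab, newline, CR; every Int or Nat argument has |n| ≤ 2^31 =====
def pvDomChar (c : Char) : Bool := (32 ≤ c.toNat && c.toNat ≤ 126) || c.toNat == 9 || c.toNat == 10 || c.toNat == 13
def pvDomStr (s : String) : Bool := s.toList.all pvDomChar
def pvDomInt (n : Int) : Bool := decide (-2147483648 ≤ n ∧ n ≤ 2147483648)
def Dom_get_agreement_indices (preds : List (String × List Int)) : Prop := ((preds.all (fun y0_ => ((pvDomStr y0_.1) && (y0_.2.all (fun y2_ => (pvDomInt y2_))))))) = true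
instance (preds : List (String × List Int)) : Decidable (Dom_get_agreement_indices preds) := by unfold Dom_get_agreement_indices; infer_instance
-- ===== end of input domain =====

-- B is position-major: per index it groups models by their predicted value into buckets and
-- derives agreements (same bucket) and disagreements (different buckets), instead of A's
-- per-pair zip comparison (objective: alternative algorithm).

-- ===== PORT A =====
-- A's innermost zip-loop body: append num to aggr[model1][model2] or disag[model1][model2]
def aZipStep (m1 m2 : String)
    (st : PySem.Dict String (PySem.Dict String (List Int)) × PySem.Dict String (PySem.Dict String (List Int)))
    (t : Int × Int × Int) :
    PySem.Dict String (PySem.Dict String (List Int)) × PySem.Dict String (PySem.Dict String (List Int)) :=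
  if t.2.1 = t.2.2 then
    (st.1.modify m1 PySem.Dict.empty (fun r => r.modify m2 [] (fun l => l ++ [t.1])), st.2)
  else
    (st.1, st.2.modify m1 PySem.Dict.empty (fun r => r.modify m2 [] (fun l => l ++ [t.1])))

-- A's model2-loop body: set both inner cells to [] then, if model1 != model2, run the zip loop
def aInner (pd : PySem.Dict String (List Int)) (m1 : String)
    (st : PySem.Dict String (PySem.Dict String (List Int)) × PySem.Dict String (PySem.Dict String (List Int)))
    (m2 : String) :
    PySem.Dict String (PySem.Dict String (List Int)) × PySem.Dict String (PySem.Dict String (List Int)) :=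
  let st1 := (st.1.modify m1 PySem.Dict.empty (fun r => r.insert m2 []),
              st.2.modify m1 PySem.Dict.empty (fun r => r.insert m2 []))
  if m1 ≠ m2 then
    ((PySem.List.pyRange 0 ((pd.getD m1 []).length : Int) 1).zip
        ((pd.getD m1 []).zip (pd.getD m2 []))).foldl (aZipStep m1 m2) st1
  else st1

-- A's model1-loop body: aggr[model1], disag[model1] = {}, {} then the model2 loop
def aOuter (pd : PySem.Dict String (List Int)) (ks : List String)
    (st : PySem.Dict String (PySem.Dict String (List Int)) × PySem.Dict String (PySem.Dict String (List Int)))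
    (m1 : String) :
    PySem.Dict String (PySem.Dict String (List Int)) × PySem.Dict String (PySem.Dict String (List Int)) :=
  ks.foldl (aInner pd m1) (st.1.insert m1 PySem.Dict.empty, st.2.insert m1 PySem.Dict.empty)

def get_agreement_indices (preds : List (String × List Int)) :
    (List (String × List (String × List Int))) × (List (String × List (String × List Int))) :=
  let pd := PySem.Dict.mk preds
  let ks := pd.keys
  let st := ks.foldl (aOuter pd ks) (PySem.Dict.empty, PySem.Dict.empty)
  (st.1.items.map (fun p => (p.1, p.2.items)), st.2.items.map (fun p => (p.1, p.2.items)))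

-- ===== PORT B =====
-- buckets.setdefault(row[num], []).append(m), guarded by num < len(row); under that guard
-- row[num] is in range, so pyGetD's default is unreachable (exact)
def bBucketStep (pd : PySem.Dict String (List Int)) (num : Int)
    (d : PySem.Dict Int (List String)) (m : String) : PySem.Dict Int (List String) :=
  let row := pd.getD m []
  if num < (row.length : Int) then
    d.modify (PySem.List.pyGetD row num 0) [] (fun l => l ++ [m])
  else d

-- xxx_indices[m][n].append(num)
def bAppend (g : PySem.Dict String (PySem.Dict String (List Int))) (m n : String) (num : Int) :
    PySem.Dict String (PySem.Dict String (List Int)) :=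
  g.modify m PySem.Dict.empty (fun r => r.modify n [] (fun l => l ++ [num]))

-- one iteration of 'for num in range(max_len)': build the buckets, then the two bucket loops
def bNumStep (pd : PySem.Dict String (List Int)) (ks : List String)
    (st : PySem.Dict String (PySem.Dict String (List Int)) × PySem.Dict String (PySem.Dict String (List Int)))
    (num : Int) :
    PySem.Dict String (PySem.Dict String (List Int)) × PySem.Dict String (PySem.Dict String (List Int)) :=
  let buckets := ks.foldl (bBucketStep pd num) PySem.Dict.empty
  let g1 := buckets.values.foldl (fun g ms =>
      ms.foldl (fun g m => ms.foldl (fun g n => if m ≠ n then bAppend g m n num else g) g) g) st.1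
  let g2 := buckets.items.foldl (fun g p1 =>
      buckets.items.foldl (fun g p2 =>
        if p1.1 ≠ p2.1 then
          p1.2.foldl (fun g m => p2.2.foldl (fun g n => bAppend g m n num) g) g
        else g) g) st.2
  (g1, g2)

def get_agreement_indices_alt (preds : List (String × List Int)) :
    (List (String × List (String × List Int))) × (List (String × List (String × List Int))) :=
  let pd := PySem.Dict.mk preds
  let ks := pd.keys
  let row0 := ks.foldl (fun (d : PySem.Dict String (List Int)) n => d.insert n ([] : List Int)) PySem.Dict.empty
  let g0 := ks.foldl
    (fun (d : PySem.Dict String (PySem.Dict String (List Int))) m => d.insert m row0) PySem.Dict.empty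
  let maxLen := PySem.List.maxD (pd.values.map (fun v => (v.length : Int))) (fun x => x) 0
  let st := (PySem.List.pyRange 0 maxLen 1).foldl (bNumStep pd ks) (g0, g0)
  (st.1.items.map (fun p => (p.1, p.2.items)), st.2.items.map (fun p => (p.1, p.2.items)))

-- ===== PRECONDITION & SPEC =====
-- Pre_ excludes association lists with duplicate keys: they do not faithfully represent a Python
-- dict (dict construction merges duplicates), so the assoc-list reading of A's input is ambiguous there.
def Pre_get_agreement_indices (preds : List (String × List Int)) : Prop :=
  (preds.map Prod.fst).Nodup
instance (preds : List (String × List Int)) : Decidable (Pre_get_agreement_indices preds) := by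
  unfold Pre_get_agreement_indices; infer_instance

def pvWitness_get_agreement_indices : (List (String × List Int)) := [("a", [1, 2]), ("b", [1, 3])]

def Spec_get_agreement_indices (preds : List (String × List Int))
    (out : (List (String × List (String × List Int))) × (List (String × List (String × List Int)))) : Prop :=
  out = get_agreement_indices_alt preds
instance (preds : List (String × List Int))
    (out : (List (String × List (String × List Int))) × (List (String × List (String × List Int)))) :
    Decidable (Spec_get_agreement_indices preds out) := by
  unfold Spec_get_agreement_indices; exact instDecidableEqProd _ _

-- ===== CLAIM (what is proved, stated in full; the proofs are below) =====
def Claim_equal_get_agreement_indices : Prop :=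
  ∀ (preds : List (String × List Int)), Dom_get_agreement_indices preds →
    Pre_get_agreement_indices preds →
    Spec_get_agreement_indices preds (get_agreement_indices preds)

-- ===== LEMMAS AND PROOFS =====

-- agree / disagree index lists of an enumerated pair list
def mapP (l : List (Int × Int × Int)) : List Int := (l.filter (fun t => t.2.1 == t.2.2)).map (·.1)
def mapN (l : List (Int × Int × Int)) : List Int := (l.filter (fun t => !(t.2.1 == t.2.2))).map (·.1)

def zl (pd : PySem.Dict String (List Int)) (m n : String) : List (Int × Int × Int) :=
  PySem.List.enumerate ((pd.getD m []).zip (pd.getD n [])) 0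

def agL (pd : PySem.Dict String (List Int)) (m n : String) : List Int := mapP (zl pd m n)
def dgL (pd : PySem.Dict String (List Int)) (m n : String) : List Int := mapN (zl pd m n)
def valAg (pd : PySem.Dict String (List Int)) (m n : String) : List Int := if m = n then [] else agL pd m n
def valDg (pd : PySem.Dict String (List Int)) (m n : String) : List Int := if m = n then [] else dgL pd m n

def grid (ks : List String) (F : String → String → List Int) :
    PySem.Dict String (PySem.Dict String (List Int)) :=
  PySem.Dict.mk (ks.map (fun m => (m, PySem.Dict.mk (ks.map (fun n => (n, F m n))))))

-- B's target cell contents after the first K indices have been processed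
def FAg (pd : PySem.Dict String (List Int)) (K : Nat) (m n : String) : List Int :=
  ((List.range K).filter (fun k => decide (m ≠ n ∧ k < (pd.getD m []).length ∧
      k < (pd.getD n []).length ∧ (pd.getD m []).getD k 0 = (pd.getD n []).getD k 0))).map
    (fun (k : Nat) => (k : Int))
def FDg (pd : PySem.Dict String (List Int)) (K : Nat) (m n : String) : List Int :=
  ((List.range K).filter (fun k => decide (k < (pd.getD m []).length ∧
      k < (pd.getD n []).length ∧ (pd.getD m []).getD k 0 ≠ (pd.getD n []).getD k 0))).map
    (fun (k : Nat) => (k : Int))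

-- models with a prediction at index K, and that prediction
def presL (pd : PySem.Dict String (List Int)) (ks : List String) (K : Nat) : List String :=
  ks.filter (fun m => decide (K < (pd.getD m []).length))
def valV (pd : PySem.Dict String (List Int)) (K : Nat) (m : String) : Int :=
  (pd.getD m []).getD K 0
def grp (pd : PySem.Dict String (List Int)) (ks : List String) (K : Nat) (v : Int) : List String :=
  (presL pd ks K).filter (fun m => valV pd K m == v)
def keysB (pd : PySem.Dict String (List Int)) (ks : List String) (K : Nat) : List Int :=
  PySem.Set.ofList ((presL pd ks K).map (valV pd K))

theorem insert_modify {κ ν : Type} [BEq κ] [LawfulBEq κ]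
    (d : PySem.Dict κ ν) (k : κ) (v d0 : ν) (f : ν → ν) :
    (d.insert k v).modify k d0 f = d.insert k (f v) := by
  have h : (d.insert k v).modify k d0 f = (d.insert k v).insert k (f ((d.insert k v).getD k d0)) := rfl
  rw [h, PySem.Dict.getD_insert_self, PySem.Dict.insert_insert_self]

theorem A_inner_fold (l : List (Int × Int × Int)) (d1 d2 : PySem.Dict String (PySem.Dict String (List Int)))
    (m1 m2 : String) (r1 r2 : PySem.Dict String (List Int)) (v1 v2 : List Int) :
    l.foldl (aZipStep m1 m2) (d1.insert m1 (r1.insert m2 v1), d2.insert m1 (r2.insert m2 v2))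
      = (d1.insert m1 (r1.insert m2 (v1 ++ mapP l)), d2.insert m1 (r2.insert m2 (v2 ++ mapN l))) := by
  induction l generalizing v1 v2 with
  | nil => simp [mapP, mapN]
  | cons t l ih =>
    simp only [List.foldl_cons]
    by_cases h : t.2.1 = t.2.2 <;> simp [aZipStep, h, insert_modify, ih, mapP, mapN]

theorem zip_pyRange {α : Type} (l : List α) (s e : Int) (h : s + l.length ≤ e) :
    (PySem.List.pyRange s e 1).zip l = PySem.List.enumerate l s := by
  induction l generalizing s with
  | nil => simp [PySem.List.enumerate_nil]
  | cons x l ih =>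
    have hs : s < e := by simp at h; omega
    rw [PySem.List.pyRange_one_cons hs]
    simp only [List.zip_cons_cons, PySem.List.enumerate_cons]
    rw [ih (s+1) (by simp at h ⊢; omega)]

theorem A_middle_fold (pd : PySem.Dict String (List Int)) (ks2 : List String)
    (d1 d2 : PySem.Dict String (PySem.Dict String (List Int))) (m1 : String)
    (r1 r2 : PySem.Dict String (List Int)) :
    ks2.foldl (aInner pd m1) (d1.insert m1 r1, d2.insert m1 r2)
      = (d1.insert m1 (ks2.foldl (fun r m2 => r.insert m2 (valAg pd m1 m2)) r1),
         d2.insert m1 (ks2.foldl (fun r m2 => r.insert m2 (valDg pd m1 m2)) r2)) := by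
  induction ks2 generalizing r1 r2 with
  | nil => simp
  | cons m2 l ih =>
    simp only [List.foldl_cons, aInner]
    by_cases h : m1 = m2
    · have hcond : ¬ (m1 ≠ m2) := by simp [h]
      rw [if_neg hcond]
      simp only [insert_modify]
      rw [ih]
      simp [valAg, valDg, h]
    · have hz : (PySem.List.pyRange 0 ((pd.getD m1 []).length : Int) 1).zip
          ((pd.getD m1 []).zip (pd.getD m2 [])) = zl pd m1 m2 := by
        rw [zip_pyRange]
        · rfl
        · simp [List.length_zip]
      simp only [h, ne_eq, not_false_iff, if_pos, insert_modify]
      rw [hz, A_inner_fold, ih]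
      simp [valAg, valDg, h, agL, dgL]

theorem foldl_insert_mk {ν : Type} (ks : List String) (hnd : ks.Nodup) (f : String → ν) :
    (ks.foldl (fun (d : PySem.Dict String ν) n => d.insert n (f n)) PySem.Dict.empty)
      = PySem.Dict.mk (ks.map fun n => (n, f n)) := by
  apply PySem.Dict.ext
  rw [PySem.Dict.items_foldl_insert_fresh (k := fun a => a)]
  · rfl
  · simp
  · simpa using hnd

theorem A_items (pd : PySem.Dict String (List Int)) (ks : List String) (hnd : ks.Nodup) :
    ks.foldl (aOuter pd ks) (PySem.Dict.empty, PySem.Dict.empty)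
      = (grid ks (valAg pd), grid ks (valDg pd)) := by
  have hfun : aOuter pd ks = fun st m1 =>
      (st.1.insert m1 (ks.foldl (fun r m2 => r.insert m2 (valAg pd m1 m2)) PySem.Dict.empty),
       st.2.insert m1 (ks.foldl (fun r m2 => r.insert m2 (valDg pd m1 m2)) PySem.Dict.empty)) := by
    funext st m1
    simp only [aOuter]
    exact A_middle_fold pd ks st.1 st.2 m1 _ _
  rw [hfun, PySem.List.foldl_prod_mk
        (fun d m1 => d.insert m1 (ks.foldl (fun r m2 => r.insert m2 (valAg pd m1 m2)) PySem.Dict.empty))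
        (fun d m1 => d.insert m1 (ks.foldl (fun r m2 => r.insert m2 (valDg pd m1 m2)) PySem.Dict.empty))
        ks PySem.Dict.empty PySem.Dict.empty,
      foldl_insert_mk ks hnd, foldl_insert_mk ks hnd]
  have h1 : ∀ (F : String → String → List Int),
      (PySem.Dict.mk (ks.map fun n =>
        (n, ks.foldl (fun r m2 => r.insert m2 (F n m2)) PySem.Dict.empty))) = grid ks F := by
    intro F
    simp only [grid]
    exact congrArg _ (List.map_congr_left fun m _ => by rw [foldl_insert_mk ks hnd])
  rw [h1, h1]

theorem grid_congr (ks : List String) (F G : String → String → List Int)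
    (h : ∀ m ∈ ks, ∀ n ∈ ks, F m n = G m n) : grid ks F = grid ks G := by
  simp only [grid]
  exact congrArg _ (List.map_congr_left fun m hm =>
    congrArg _ (congrArg _ (List.map_congr_left fun n hn => by rw [h m hm n hn])))

theorem grid_update (ks : List String) (hnd : ks.Nodup) (m n : String) (hm : m ∈ ks) (hn : n ∈ ks)
    (F : String → String → List Int) (v : List Int) :
    (grid ks F).modify m PySem.Dict.empty (fun r => r.insert n v)
      = grid ks (fun m' n' => if m' = m ∧ n' = n then v else F m' n') := by
  have hkeys : (grid ks F).keys = ks := by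
    simp [grid, PySem.Dict.keys_mk, Function.comp_def]
  have hndk : (grid ks F).keys.Nodup := by rw [hkeys]; exact hnd
  have hitems : (m, PySem.Dict.mk (ks.map fun n' => (n', F m n'))) ∈ (grid ks F).items :=
    List.mem_map_of_mem hm
  have hget : (grid ks F).getD m PySem.Dict.empty = PySem.Dict.mk (ks.map fun n' => (n', F m n')) :=
    PySem.Dict.getD_of_mem_items _ hitems hndk _
  have hmod : (grid ks F).modify m PySem.Dict.empty (fun r => r.insert n v)
      = (grid ks F).insert m ((PySem.Dict.mk (ks.map fun n' => (n', F m n'))).insert n v) := by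
    have h0 : (grid ks F).modify m PySem.Dict.empty (fun r => r.insert n v)
        = (grid ks F).insert m (((grid ks F).getD m PySem.Dict.empty).insert n v) := rfl
    rw [h0, hget]
  have hinC : (PySem.Dict.mk (ks.map fun n' => (n', F m n'))).contains n = true := by
    rw [PySem.Dict.contains_iff_mem_keys]
    simp only [PySem.Dict.keys_mk, List.map_map]
    simpa using hn
  have hinner : (PySem.Dict.mk (ks.map fun n' => (n', F m n'))).insert n v
      = PySem.Dict.mk (ks.map fun n' => (n', if n' = n then v else F m n')) := by
    apply PySem.Dict.ext
    rw [PySem.Dict.items_insert_of_contains _ _ hinC]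
    show (ks.map fun n' => (n', F m n')).map _ = _
    rw [List.map_map]
    apply List.map_congr_left
    intro n' _
    by_cases h : n' = n <;> simp [h]
  have houtC : (grid ks F).contains m = true := by
    rw [PySem.Dict.contains_iff_mem_keys, hkeys]; exact hm
  rw [hmod, hinner]
  apply PySem.Dict.ext
  rw [PySem.Dict.items_insert_of_contains _ _ houtC]
  show (ks.map _).map _ = ks.map _
  rw [List.map_map]
  apply List.map_congr_left
  intro m' _
  by_cases h : m' = m
  · subst h; simp
  · simp [h]

theorem B_init (ks : List String) (hnd : ks.Nodup) :
    ks.foldl (fun (d : PySem.Dict String (PySem.Dict String (List Int))) m =>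
        d.insert m (ks.foldl (fun (d : PySem.Dict String (List Int)) n => d.insert n ([] : List Int))
          PySem.Dict.empty)) PySem.Dict.empty
      = grid ks (fun _ _ => []) := by
  rw [foldl_insert_mk ks hnd (f := fun _ => ks.foldl
    (fun (d : PySem.Dict String (List Int)) n => d.insert n ([] : List Int)) PySem.Dict.empty)]
  simp only [grid]
  exact congrArg _ (List.map_congr_left fun m _ => by
    rw [foldl_insert_mk ks hnd (f := fun _ => ([] : List Int))])

-- modify-form of grid_update: xxx[m][n] becomes f applied to the old cell
theorem grid_modify (ks : List String) (hnd : ks.Nodup) (m n : String) (hm : m ∈ ks) (hn : n ∈ ks)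
    (F : String → String → List Int) (f : List Int → List Int) :
    (grid ks F).modify m PySem.Dict.empty (fun r => r.modify n [] f)
      = grid ks (fun m' n' => if m' = m ∧ n' = n then f (F m n) else F m' n') := by
  have hkeys : (grid ks F).keys = ks := by
    simp [grid, PySem.Dict.keys_mk, Function.comp_def]
  have hndk : (grid ks F).keys.Nodup := by rw [hkeys]; exact hnd
  have hitems : (m, PySem.Dict.mk (ks.map fun n' => (n', F m n'))) ∈ (grid ks F).items :=
    List.mem_map_of_mem hm
  have hget : (grid ks F).getD m PySem.Dict.empty = PySem.Dict.mk (ks.map fun n' => (n', F m n')) :=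
    PySem.Dict.getD_of_mem_items _ hitems hndk _
  have hndin : (PySem.Dict.mk (ks.map fun n' => (n', F m n'))).keys.Nodup := by
    simp only [PySem.Dict.keys_mk, List.map_map]
    simpa [Function.comp_def] using hnd
  have hmemn : (n, F m n) ∈ (PySem.Dict.mk (ks.map fun n' => (n', F m n'))).items :=
    List.mem_map_of_mem hn
  have hFmn : (PySem.Dict.mk (ks.map fun n' => (n', F m n'))).getD n [] = F m n :=
    PySem.Dict.getD_of_mem_items _ hmemn hndin _
  have h1 : (grid ks F).modify m PySem.Dict.empty (fun r => r.modify n [] f)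
      = (grid ks F).modify m PySem.Dict.empty (fun r => r.insert n (f (F m n))) := by
    show (grid ks F).insert m (((grid ks F).getD m PySem.Dict.empty).modify n [] f)
      = (grid ks F).insert m (((grid ks F).getD m PySem.Dict.empty).insert n (f (F m n)))
    rw [hget]
    congr 1
    show (PySem.Dict.mk (ks.map fun n' => (n', F m n'))).insert n
        (f ((PySem.Dict.mk (ks.map fun n' => (n', F m n'))).getD n [])) = _
    rw [hFmn]
  rw [h1, grid_update ks hnd m n hm hn F (f (F m n))]

-- folding cell-appends over a duplicate-free pair list = a pointwise grid update
theorem foldl_bAppend_pairs (ks : List String) (hnd : ks.Nodup) (num : Int)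
    (pl : List (String × String)) (hpl : pl.Nodup)
    (hin : ∀ p ∈ pl, p.1 ∈ ks ∧ p.2 ∈ ks) (F : String → String → List Int) :
    pl.foldl (fun g p => bAppend g p.1 p.2 num) (grid ks F)
      = grid ks (fun m n => if (m, n) ∈ pl then F m n ++ [num] else F m n) := by
  induction pl generalizing F with
  | nil => exact (grid_congr ks _ _ (fun m _ n _ => by simp)).symm
  | cons p rest ih =>
    have hp := hin p List.mem_cons_self
    have hnotin : p ∉ rest := (List.nodup_cons.mp hpl).1
    simp only [List.foldl_cons]
    have hstep : bAppend (grid ks F) p.1 p.2 num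
        = grid ks (fun m' n' => if m' = p.1 ∧ n' = p.2 then F p.1 p.2 ++ [num] else F m' n') :=
      grid_modify ks hnd p.1 p.2 hp.1 hp.2 F (fun l => l ++ [num])
    rw [hstep, ih (List.nodup_cons.mp hpl).2 (fun q hq => hin q (List.mem_cons_of_mem _ hq))]
    apply grid_congr
    intro m _ n _
    by_cases h1 : (m, n) ∈ rest
    · have hne : ¬ (m = p.1 ∧ n = p.2) := by
        rintro ⟨rfl, rfl⟩; exact hnotin h1
      simp [h1, hne, List.mem_cons]
    · by_cases h2 : m = p.1 ∧ n = p.2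
      · obtain ⟨rfl, rfl⟩ := h2
        simp [h1, List.mem_cons]
      · have : (m, n) ∉ (p :: rest) := by
          simp only [List.mem_cons]
          rintro (h | h)
          · exact h2 ⟨congrArg Prod.fst h, congrArg Prod.snd h⟩
          · exact h1 h
        simp [h1, h2, this]

-- enumerate as a map over List.range
theorem enumerate_eq_range {α : Type} (l : List α) (s : Int) (d : α) :
    PySem.List.enumerate l s = (List.range l.length).map (fun (k : Nat) => (s + (k : Int), l.getD k d)) := by
  induction l generalizing s with
  | nil => simp [PySem.List.enumerate_nil]
  | cons x t ih =>
    rw [PySem.List.enumerate_cons, ih (s + 1)]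
    simp only [List.length_cons, List.range_succ_eq_map, List.map_cons, List.map_map]
    refine List.cons_eq_cons.mpr ⟨by simp, ?_⟩
    apply List.map_congr_left
    intro k _
    simp only [Function.comp_def, List.getD_cons_succ]
    congr 1
    push_cast
    ring

theorem zip_getD (xs ys : List Int) (k : Nat) (h : k < min xs.length ys.length) :
    (xs.zip ys).getD k (0, 0) = (xs.getD k 0, ys.getD k 0) := by
  have hk : k < (xs.zip ys).length := by rw [List.length_zip]; omega
  rw [List.getD_eq_getElem _ _ hk, List.getElem_zip,
      List.getD_eq_getElem _ _ (by omega : k < xs.length),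
      List.getD_eq_getElem _ _ (by omega : k < ys.length)]

-- A's per-pair agreement list as a filtered index range
theorem mapP_eq_range (xs ys : List Int) :
    mapP (PySem.List.enumerate (xs.zip ys) 0)
      = ((List.range (min xs.length ys.length)).filter
          (fun k => xs.getD k 0 == ys.getD k 0)).map (fun (k : Nat) => (k : Int)) := by
  rw [enumerate_eq_range (xs.zip ys) 0 (0, 0)]
  simp only [mapP, List.filter_map, List.map_map, List.length_zip]
  refine Eq.trans (congrArg _ (List.filter_congr fun k hk => ?_))
    (List.map_congr_left fun k hk => ?_)
  · simp only [Function.comp_def]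
    rw [zip_getD xs ys k (List.mem_range.mp hk)]
  · simp

theorem mapN_eq_range (xs ys : List Int) :
    mapN (PySem.List.enumerate (xs.zip ys) 0)
      = ((List.range (min xs.length ys.length)).filter
          (fun k => !(xs.getD k 0 == ys.getD k 0))).map (fun (k : Nat) => (k : Int)) := by
  rw [enumerate_eq_range (xs.zip ys) 0 (0, 0)]
  simp only [mapN, List.filter_map, List.map_map, List.length_zip]
  refine Eq.trans (congrArg _ (List.filter_congr fun k hk => ?_))
    (List.map_congr_left fun k hk => ?_)
  · simp only [Function.comp_def]
    rw [zip_getD xs ys k (List.mem_range.mp hk)]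
  · simp

-- extending the index range beyond both lists does not add indices
theorem filter_range_extend (p : Nat → Bool) (lo K : Nat) (hK : lo ≤ K)
    (h : ∀ k, p k → k < lo) :
    (List.range K).filter p = (List.range lo).filter p := by
  induction K with
  | zero =>
    have : lo = 0 := by omega
    rw [this]
  | succ K ih =>
    rcases Nat.lt_or_ge lo (K + 1) with hlt | hge
    · have hloK : lo ≤ K := by omega
      rw [List.range_succ, List.filter_append, ih hloK]
      have : p K = false := by
        cases hpK : p K
        · rfl
        · exact absurd (h K hpK) (by omega)
      simp [this]
    · have : lo = K + 1 := by omega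
      rw [this]

-- flattened pair lists produced by the two bucket loops at index K
def pairsSame (ms : List String) : List (String × String) :=
  ms.flatMap (fun m => (ms.filter (fun n => decide (m ≠ n))).map (fun n => (m, n)))

def pairsCross (ms1 ms2 : List String) : List (String × String) :=
  ms1.flatMap (fun m => ms2.map (fun n => (m, n)))

def plA (pd : PySem.Dict String (List Int)) (ks : List String) (K : Nat) : List (String × String) :=
  (keysB pd ks K).flatMap (fun v => pairsSame (grp pd ks K v))

def itemsB (pd : PySem.Dict String (List Int)) (ks : List String) (K : Nat) : List (Int × List String) :=
  (keysB pd ks K).map (fun v => (v, grp pd ks K v))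

def plD (pd : PySem.Dict String (List Int)) (ks : List String) (K : Nat) : List (String × String) :=
  (itemsB pd ks K).flatMap (fun p1 =>
    ((itemsB pd ks K).filter (fun p2 => decide (p1.1 ≠ p2.1))).flatMap
      (fun p2 => pairsCross p1.2 p2.2))

theorem mem_grp (pd : PySem.Dict String (List Int)) (ks : List String) (K : Nat) (v : Int)
    (m : String) : m ∈ grp pd ks K v ↔ m ∈ ks ∧ K < (pd.getD m []).length ∧ valV pd K m = v := by
  simp only [grp, presL, List.mem_filter, decide_eq_true_eq, beq_iff_eq]
  tauto

theorem nodup_presL (pd : PySem.Dict String (List Int)) (ks : List String) (hnd : ks.Nodup)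
    (K : Nat) : (presL pd ks K).Nodup := hnd.filter _

theorem nodup_grp (pd : PySem.Dict String (List Int)) (ks : List String) (hnd : ks.Nodup)
    (K : Nat) (v : Int) : (grp pd ks K v).Nodup := (nodup_presL pd ks hnd K).filter _

theorem nodup_keysB (pd : PySem.Dict String (List Int)) (ks : List String) (K : Nat) :
    (keysB pd ks K).Nodup := PySem.Set.nodup_ofList _

theorem mem_keysB (pd : PySem.Dict String (List Int)) (ks : List String) (K : Nat) (v : Int) :
    v ∈ keysB pd ks K ↔ ∃ m ∈ ks, K < (pd.getD m []).length ∧ valV pd K m = v := by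
  simp [keysB, PySem.Set.mem_ofList, List.mem_map, presL, List.mem_filter, and_assoc]

-- nodup of a flatMap whose inner elements remember the outer key
theorem nodup_flatMap_key {α β γ : Type} (l : List α) (key : α → γ) (f : α → List β)
    (keyb : β → γ) (hl : (l.map key).Nodup) (hf : ∀ a ∈ l, (f a).Nodup)
    (hkey : ∀ a ∈ l, ∀ b ∈ f a, keyb b = key a) : (l.flatMap f).Nodup := by
  rw [List.nodup_flatMap]
  refine ⟨hf, ?_⟩
  have hpw : l.Pairwise (fun a b => key a ≠ key b) := by
    rw [List.Nodup, List.pairwise_map] at hl; exact hl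
  have : ∀ a ∈ l, ∀ b ∈ l, key a ≠ key b → (f a).Disjoint (f b) := by
    intro a ha b hb hab x hxa hxb
    exact hab ((hkey a ha x hxa).symm.trans (hkey b hb x hxb))
  exact List.Pairwise.imp_of_mem (fun ha hb h => this _ ha _ hb h) hpw

theorem mem_pairsSame (ms : List String) (x : String × String) :
    x ∈ pairsSame ms ↔ x.1 ∈ ms ∧ x.2 ∈ ms ∧ x.1 ≠ x.2 := by
  obtain ⟨m, n⟩ := x
  simp only [pairsSame, List.mem_flatMap, List.mem_map, List.mem_filter]
  constructor
  · rintro ⟨m', hm', n', ⟨hn', hne⟩, h⟩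
    injection h with h1 h2
    subst h1; subst h2
    exact ⟨hm', hn', by simpa using hne⟩
  · rintro ⟨hm, hn, hne⟩
    exact ⟨m, hm, n, ⟨hn, by simpa using hne⟩, rfl⟩

theorem nodup_pairsSame (ms : List String) (hms : ms.Nodup) : (pairsSame ms).Nodup := by
  refine nodup_flatMap_key ms (fun m => m) _ (fun p => p.1) (by simpa using hms) ?_ ?_
  · intro m _
    exact ((hms.filter _).map (fun a b h => by
      simpa using congrArg Prod.snd h))
  · intro m _ p hp
    rcases List.mem_map.mp hp with ⟨n, _, rfl⟩
    rfl

theorem mem_pairsCross (ms1 ms2 : List String) (x : String × String) :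
    x ∈ pairsCross ms1 ms2 ↔ x.1 ∈ ms1 ∧ x.2 ∈ ms2 := by
  obtain ⟨m, n⟩ := x
  simp only [pairsCross, List.mem_flatMap, List.mem_map]
  constructor
  · rintro ⟨m', hm', n', hn', h⟩
    injection h with h1 h2
    subst h1; subst h2
    exact ⟨hm', hn'⟩
  · rintro ⟨hm, hn⟩
    exact ⟨m, hm, n, hn, rfl⟩

theorem nodup_pairsCross (ms1 ms2 : List String) (h1 : ms1.Nodup) (h2 : ms2.Nodup) :
    (pairsCross ms1 ms2).Nodup := by
  refine nodup_flatMap_key ms1 (fun m => m) _ (fun p => p.1) (by simpa using h1) ?_ ?_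
  · intro m _
    exact h2.map (fun a b h => by simpa using congrArg Prod.snd h)
  · intro m _ p hp
    rcases List.mem_map.mp hp with ⟨n, _, rfl⟩
    rfl

theorem mem_plA (pd : PySem.Dict String (List Int)) (ks : List String) (K : Nat)
    (x : String × String) :
    x ∈ plA pd ks K ↔ x.1 ∈ ks ∧ x.2 ∈ ks ∧ x.1 ≠ x.2 ∧ K < (pd.getD x.1 []).length ∧
      K < (pd.getD x.2 []).length ∧ valV pd K x.1 = valV pd K x.2 := by
  simp only [plA, List.mem_flatMap, mem_pairsSame, mem_grp]
  constructor
  · rintro ⟨v, _, ⟨h1, h2, hv1⟩, ⟨h3, h4, hv2⟩, hne⟩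
    exact ⟨h1, h3, hne, h2, h4, hv1.trans hv2.symm⟩
  · rintro ⟨h1, h2, hne, h3, h4, hv⟩
    refine ⟨valV pd K x.1, ?_, ⟨h1, h3, rfl⟩, ⟨h2, h4, hv.symm⟩, hne⟩
    exact (mem_keysB pd ks K _).mpr ⟨x.1, h1, h3, rfl⟩

theorem nodup_plA (pd : PySem.Dict String (List Int)) (ks : List String) (hnd : ks.Nodup)
    (K : Nat) : (plA pd ks K).Nodup := by
  refine nodup_flatMap_key (keysB pd ks K) (fun v => v) _ (fun p => valV pd K p.1)
    (by simpa using nodup_keysB pd ks K) ?_ ?_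
  · intro v _
    exact nodup_pairsSame _ (nodup_grp pd ks hnd K v)
  · intro v _ p hp
    exact ((mem_grp pd ks K v p.1).mp ((mem_pairsSame _ p).mp hp).1).2.2

theorem mem_itemsB (pd : PySem.Dict String (List Int)) (ks : List String) (K : Nat)
    (p : Int × List String) :
    p ∈ itemsB pd ks K ↔ p.1 ∈ keysB pd ks K ∧ p.2 = grp pd ks K p.1 := by
  obtain ⟨v, ms⟩ := p
  simp only [itemsB, List.mem_map]
  constructor
  · rintro ⟨v', hv', h⟩
    injection h with h1 h2
    subst h1; subst h2
    exact ⟨hv', rfl⟩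
  · rintro ⟨hv, rfl⟩
    exact ⟨v, hv, rfl⟩

theorem mem_plD (pd : PySem.Dict String (List Int)) (ks : List String) (K : Nat)
    (x : String × String) :
    x ∈ plD pd ks K ↔ x.1 ∈ ks ∧ x.2 ∈ ks ∧ K < (pd.getD x.1 []).length ∧
      K < (pd.getD x.2 []).length ∧ valV pd K x.1 ≠ valV pd K x.2 := by
  simp only [plD, List.mem_flatMap, List.mem_filter, mem_pairsCross, mem_itemsB]
  constructor
  · rintro ⟨p1, ⟨hk1, hg1⟩, p2, ⟨⟨hk2, hg2⟩, hne⟩, hm, hn⟩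
    rw [hg1] at hm; rw [hg2] at hn
    have h1 := (mem_grp pd ks K p1.1 x.1).mp hm
    have h2 := (mem_grp pd ks K p2.1 x.2).mp hn
    refine ⟨h1.1, h2.1, h1.2.1, h2.2.1, ?_⟩
    rw [h1.2.2, h2.2.2]
    simpa using hne
  · rintro ⟨h1, h2, h3, h4, hne⟩
    refine ⟨(valV pd K x.1, grp pd ks K (valV pd K x.1)),
        ⟨(mem_keysB pd ks K _).mpr ⟨x.1, h1, h3, rfl⟩, rfl⟩,
      (valV pd K x.2, grp pd ks K (valV pd K x.2)),
        ⟨⟨(mem_keysB pd ks K _).mpr ⟨x.2, h2, h4, rfl⟩, rfl⟩, by simpa using hne⟩,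
      (mem_grp pd ks K _ x.1).mpr ⟨h1, h3, rfl⟩,
      (mem_grp pd ks K _ x.2).mpr ⟨h2, h4, rfl⟩⟩

theorem nodup_plD (pd : PySem.Dict String (List Int)) (ks : List String) (hnd : ks.Nodup)
    (K : Nat) : (plD pd ks K).Nodup := by
  refine nodup_flatMap_key (itemsB pd ks K) (fun p => p.1) _ (fun x => valV pd K x.1)
    ?_ ?_ ?_
  · simpa [itemsB, List.map_map, Function.comp_def] using nodup_keysB pd ks K
  · intro p1 hp1
    obtain ⟨hk1, hg1⟩ := (mem_itemsB pd ks K p1).mp hp1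
    refine nodup_flatMap_key _ (fun p => p.1) _ (fun x => valV pd K x.2) ?_ ?_ ?_
    · refine List.Nodup.sublist (List.Sublist.map _ List.filter_sublist) ?_
      simpa [itemsB, List.map_map, Function.comp_def] using nodup_keysB pd ks K
    · intro p2 hp2
      obtain ⟨hk2, hg2⟩ := (mem_itemsB pd ks K p2).mp (List.mem_of_mem_filter hp2)
      rw [hg1, hg2]
      exact nodup_pairsCross _ _ (nodup_grp pd ks hnd K _) (nodup_grp pd ks hnd K _)
    · intro p2 hp2 x hx
      obtain ⟨hk2, hg2⟩ := (mem_itemsB pd ks K p2).mp (List.mem_of_mem_filter hp2)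
      rw [hg1, hg2] at hx
      exact ((mem_grp pd ks K p2.1 x.2).mp ((mem_pairsCross _ _ x).mp hx).2).2.2
  · intro p1 hp1 x hx
    obtain ⟨hk1, hg1⟩ := (mem_itemsB pd ks K p1).mp hp1
    rcases List.mem_flatMap.mp hx with ⟨p2, hp2, hx2⟩
    rw [hg1] at hx2
    exact ((mem_grp pd ks K p1.1 x.1).mp ((mem_pairsCross _ _ x).mp hx2).1).2.2

-- characterization of the buckets dict built at index K
theorem buckets_fold (pd : PySem.Dict String (List Int)) (ks : List String) (K : Nat) :
    ks.foldl (bBucketStep pd (K : Int)) PySem.Dict.empty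
      = PySem.Dict.mk ((keysB pd ks K).map (fun v => (v, grp pd ks K v))) := by
  have hstep : ks.foldl (bBucketStep pd (K : Int)) PySem.Dict.empty
      = ((presL pd ks K).map (fun m => (valV pd K m, m))).foldl
          (fun d p => d.modify p.1 [] (fun l => l ++ [p.2])) PySem.Dict.empty := by
    have h0 : bBucketStep pd (K : Int) = fun d m =>
        if (K : Int) < ((pd.getD m []).length : Int) then
          d.modify (PySem.List.pyGetD (pd.getD m []) (K : Int) 0) [] (fun l => l ++ [m])
        else d := rfl
    rw [h0, PySem.List.foldl_ite_eq_foldl_filter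
      (p := fun m => (K : Int) < ((pd.getD m []).length : Int))]
    have hfil : ks.filter (fun m => decide ((K : Int) < ((pd.getD m []).length : Int)))
        = presL pd ks K := by
      apply List.filter_congr
      intro m _
      simp [Nat.cast_lt]
    rw [hfil, List.foldl_map]
    apply PySem.List.foldl_congr_mem
    intro acc m hm
    have hlt : K < (pd.getD m []).length := by
      have := (List.mem_filter.mp hm).2
      simpa [presL] using (List.mem_filter.mp hm).2
    have hget : PySem.List.pyGetD (pd.getD m []) (K : Int) 0 = valV pd K m := by
      rw [PySem.List.pyGetD_eq_getElem _ _ (by positivity) (by exact_mod_cast hlt)]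
      rw [valV, List.getD_eq_getElem _ _ (by simpa using hlt)]
      simp
    rw [hget]
  rw [hstep]
  have hnd : (((presL pd ks K).map (fun m => (valV pd K m, m))).foldl
      (fun d p => d.modify p.1 [] (fun l => l ++ [p.2])) PySem.Dict.empty).keys.Nodup := by
    rw [show (fun (d : PySem.Dict Int (List String)) (p : Int × String) =>
          d.modify p.1 [] (fun l => l ++ [p.2]))
        = fun d p => d.modify ((fun q : Int × String => q.1) p) []
            ((fun (_ : PySem.Dict Int (List String)) (q : Int × String) => fun l => l ++ [q.2]) d p)
      from rfl]
    exact PySem.Dict.nodup_keys_foldl_modify_key _ _ _ _ _ PySem.Dict.nodup_keys_empty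
  have hkeys : (((presL pd ks K).map (fun m => (valV pd K m, m))).foldl
      (fun d p => d.modify p.1 [] (fun l => l ++ [p.2])) PySem.Dict.empty).keys = keysB pd ks K := by
    rw [show (fun (d : PySem.Dict Int (List String)) (p : Int × String) =>
          d.modify p.1 [] (fun l => l ++ [p.2]))
        = fun d p => d.modify ((fun q : Int × String => q.1) p) []
            ((fun (_ : PySem.Dict Int (List String)) (q : Int × String) => fun l => l ++ [q.2]) d p)
      from rfl]
    rw [PySem.Dict.keys_foldl_modify_key]
    simp only [PySem.Dict.keys_empty, List.map_map]
    rfl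
  have hgetD : ∀ v, (((presL pd ks K).map (fun m => (valV pd K m, m))).foldl
      (fun d p => d.modify p.1 [] (fun l => l ++ [p.2])) PySem.Dict.empty).getD v [] = grp pd ks K v := by
    intro v
    rw [PySem.Dict.getD_foldl_modify_append]
    simp only [PySem.Dict.getD_empty, List.nil_append, List.filter_map, List.map_map]
    rw [grp]
    have hfe : List.filter ((fun (p : Int × String) => p.1 == v) ∘ fun m => (valV pd K m, m))
        (presL pd ks K) = List.filter (fun m => valV pd K m == v) (presL pd ks K) := rfl
    rw [hfe]
    simp [Function.comp_def]
  apply PySem.Dict.ext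
  rw [PySem.Dict.items_eq_map_keys _ hnd ([] : List String), hkeys]
  show _ = (keysB pd ks K).map (fun v => (v, grp pd ks K v))
  exact List.map_congr_left fun v _ => by rw [hgetD v]

-- the per-index step turns the K-grids into the (K+1)-grids
theorem bNumStep_grid (pd : PySem.Dict String (List Int)) (ks : List String) (hnd : ks.Nodup)
    (K : Nat) :
    bNumStep pd ks (grid ks (FAg pd K), grid ks (FDg pd K)) (K : Int)
      = (grid ks (FAg pd (K + 1)), grid ks (FDg pd (K + 1))) := by
  have hflatC : ∀ (ms1 ms2 : List String) (g : PySem.Dict String (PySem.Dict String (List Int))),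
      ms1.foldl (fun g m => ms2.foldl (fun g n => bAppend g m n (K : Int)) g) g
        = (pairsCross ms1 ms2).foldl (fun g p => bAppend g p.1 p.2 (K : Int)) g := by
    intro ms1 ms2 g
    rw [pairsCross, List.foldl_flatMap]
    apply PySem.List.foldl_congr_mem
    intro acc m _
    rw [List.foldl_map]
  have hflatS : ∀ (ms : List String) (g : PySem.Dict String (PySem.Dict String (List Int))),
      ms.foldl (fun g m => ms.foldl (fun g n => if m ≠ n then bAppend g m n (K : Int) else g) g) g
        = (pairsSame ms).foldl (fun g p => bAppend g p.1 p.2 (K : Int)) g := by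
    intro ms g
    rw [pairsSame, List.foldl_flatMap]
    apply PySem.List.foldl_congr_mem
    intro acc m _
    rw [PySem.List.foldl_ite_eq_foldl_filter (p := fun n => m ≠ n)
      (f := fun g n => bAppend g m n (K : Int)), List.foldl_map]
  simp only [bNumStep]
  rw [buckets_fold pd ks K]
  have hvals : (PySem.Dict.mk ((keysB pd ks K).map (fun v => (v, grp pd ks K v)))).values
      = (keysB pd ks K).map (grp pd ks K) := by
    show ((keysB pd ks K).map (fun v => (v, grp pd ks K v))).map (fun p => p.2)
      = (keysB pd ks K).map (grp pd ks K)
    rw [List.map_map]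
    rfl
  have hitems : (PySem.Dict.mk ((keysB pd ks K).map (fun v => (v, grp pd ks K v)))).items
      = itemsB pd ks K := rfl
  rw [hvals, hitems]
  refine Prod.ext ?_ ?_
  · show ((keysB pd ks K).map (grp pd ks K)).foldl _ (grid ks (FAg pd K)) = grid ks (FAg pd (K + 1))
    have hg1 : ((keysB pd ks K).map (grp pd ks K)).foldl
        (fun g ms => ms.foldl (fun g m =>
          ms.foldl (fun g n => if m ≠ n then bAppend g m n (K : Int) else g) g) g)
        (grid ks (FAg pd K))
        = (plA pd ks K).foldl (fun g p => bAppend g p.1 p.2 (K : Int)) (grid ks (FAg pd K)) := by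
      rw [plA, List.foldl_flatMap, List.foldl_map]
      apply PySem.List.foldl_congr_mem
      intro acc v _
      exact hflatS (grp pd ks K v) acc
    rw [hg1, foldl_bAppend_pairs ks hnd (K : Int) (plA pd ks K) (nodup_plA pd ks hnd K)
      (fun p hp => ⟨((mem_plA pd ks K p).mp hp).1, ((mem_plA pd ks K p).mp hp).2.1⟩)]
    apply grid_congr
    intro m hm n hn
    by_cases hc : (m, n) ∈ plA pd ks K
    · obtain ⟨_, _, hne, h3, h4, h5⟩ := (mem_plA pd ks K (m, n)).mp hc
      have hpK : (decide (m ≠ n ∧ K < (pd.getD m []).length ∧ K < (pd.getD n []).length ∧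
          (pd.getD m []).getD K 0 = (pd.getD n []).getD K 0)) = true := by
        simp only [decide_eq_true_eq]
        exact ⟨hne, h3, h4, h5⟩
      simp only [hc, if_pos, FAg, List.range_succ, List.filter_append, List.map_append,
        List.filter_cons, List.filter_nil, hpK]
      simp
    · have hpK : (decide (m ≠ n ∧ K < (pd.getD m []).length ∧ K < (pd.getD n []).length ∧
          (pd.getD m []).getD K 0 = (pd.getD n []).getD K 0)) = false := by
        simp only [decide_eq_false_iff_not]
        intro ⟨hne, h3, h4, h5⟩
        exact hc ((mem_plA pd ks K (m, n)).mpr ⟨hm, hn, hne, h3, h4, h5⟩)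
      simp only [hc, FAg, List.range_succ, List.filter_append, List.map_append,
        List.filter_cons, List.filter_nil, hpK]
      simp
  · show (itemsB pd ks K).foldl _ (grid ks (FDg pd K)) = grid ks (FDg pd (K + 1))
    have hg2 : (itemsB pd ks K).foldl
        (fun g p1 => (itemsB pd ks K).foldl (fun g p2 =>
          if p1.1 ≠ p2.1 then
            p1.2.foldl (fun g m => p2.2.foldl (fun g n => bAppend g m n (K : Int)) g) g
          else g) g)
        (grid ks (FDg pd K))
        = (plD pd ks K).foldl (fun g p => bAppend g p.1 p.2 (K : Int)) (grid ks (FDg pd K)) := by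
      rw [plD, List.foldl_flatMap]
      apply PySem.List.foldl_congr_mem
      intro acc p1 _
      rw [List.foldl_flatMap]
      refine Eq.trans (PySem.List.foldl_ite_eq_foldl_filter
        (p := fun p2 : Int × List String => p1.1 ≠ p2.1)
        (f := fun g p2 => p1.2.foldl (fun g m => p2.2.foldl (fun g n => bAppend g m n (K : Int)) g) g)
        (itemsB pd ks K) acc) ?_
      apply PySem.List.foldl_congr_mem
      intro acc2 p2 _
      exact hflatC p1.2 p2.2 acc2
    rw [hg2, foldl_bAppend_pairs ks hnd (K : Int) (plD pd ks K) (nodup_plD pd ks hnd K)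
      (fun p hp => ⟨((mem_plD pd ks K p).mp hp).1, ((mem_plD pd ks K p).mp hp).2.1⟩)]
    apply grid_congr
    intro m hm n hn
    by_cases hc : (m, n) ∈ plD pd ks K
    · obtain ⟨_, _, h3, h4, h5⟩ := (mem_plD pd ks K (m, n)).mp hc
      have hpK : (decide (K < (pd.getD m []).length ∧ K < (pd.getD n []).length ∧
          (pd.getD m []).getD K 0 ≠ (pd.getD n []).getD K 0)) = true := by
        simp only [decide_eq_true_eq]
        exact ⟨h3, h4, h5⟩
      simp only [hc, if_pos, FDg, List.range_succ, List.filter_append, List.map_append,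
        List.filter_cons, List.filter_nil, hpK]
      simp
    · have hpK : (decide (K < (pd.getD m []).length ∧ K < (pd.getD n []).length ∧
          (pd.getD m []).getD K 0 ≠ (pd.getD n []).getD K 0)) = false := by
        simp only [decide_eq_false_iff_not]
        intro ⟨h3, h4, h5⟩
        exact hc ((mem_plD pd ks K (m, n)).mpr ⟨hm, hn, h3, h4, h5⟩)
      simp only [hc, FDg, List.range_succ, List.filter_append, List.map_append,
        List.filter_cons, List.filter_nil, hpK]
      simp

-- the whole range(max_len) loop
theorem B_loop (pd : PySem.Dict String (List Int)) (ks : List String) (hnd : ks.Nodup) (N : Nat) :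
    ((List.range N).map (fun (k : Nat) => (k : Int))).foldl (bNumStep pd ks)
        (grid ks (fun _ _ => []), grid ks (fun _ _ => []))
      = (grid ks (FAg pd N), grid ks (FDg pd N)) := by
  induction N with
  | zero =>
    refine Prod.ext ?_ ?_ <;>
      exact grid_congr ks _ _ (fun m _ n _ => rfl)
  | succ N ih =>
    rw [List.range_succ, List.map_append, List.foldl_append, ih]
    simp only [List.map_cons, List.map_nil, List.foldl_cons, List.foldl_nil]
    exact bNumStep_grid pd ks hnd N

theorem maxD_int_bounds (l : List Int) (h0 : ∀ y ∈ l, 0 ≤ y) :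
    0 ≤ PySem.List.maxD l (fun x => x) 0 ∧ ∀ y ∈ l, y ≤ PySem.List.maxD l (fun x => x) 0 := by
  cases l with
  | nil => simp [PySem.List.maxD_nil]
  | cons x t =>
    rw [PySem.List.maxD_id_cons]
    obtain ⟨hx, hall⟩ := PySem.List.le_foldl_max t x
    refine ⟨le_trans (h0 x List.mem_cons_self) hx, ?_⟩
    intro y hy
    rcases List.mem_cons.mp hy with rfl | hy
    · exact hx
    · exact hall y hy

-- the two target grids coincide pointwise on the keys
theorem valAg_eq_FAg (pd : PySem.Dict String (List Int)) (_hnd : pd.keys.Nodup) (N : Nat)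
    (hN : ∀ m ∈ pd.keys, (pd.getD m []).length ≤ N) :
    ∀ m ∈ pd.keys, ∀ n ∈ pd.keys, valAg pd m n = FAg pd N m n := by
  intro m hm n hn
  by_cases hmn : m = n
  · subst hmn
    simp [valAg, FAg]
  · rw [valAg, if_neg hmn, agL, zl, mapP_eq_range, FAg,
      filter_range_extend _ (min (pd.getD m []).length (pd.getD n []).length) N
        (le_trans (min_le_left _ _) (hN m hm))
        (fun k hk => by simp only [decide_eq_true_eq] at hk; omega)]
    refine congrArg _ (List.filter_congr fun k hk => ?_)
    have hkm := List.mem_range.mp hk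
    have h1 : k < (pd.getD m []).length := by omega
    have h2 : k < (pd.getD n []).length := by omega
    simp [hmn, h1, h2, beq_eq_decide]

theorem valDg_eq_FDg (pd : PySem.Dict String (List Int)) (_hnd : pd.keys.Nodup) (N : Nat)
    (hN : ∀ m ∈ pd.keys, (pd.getD m []).length ≤ N) :
    ∀ m ∈ pd.keys, ∀ n ∈ pd.keys, valDg pd m n = FDg pd N m n := by
  intro m hm n hn
  by_cases hmn : m = n
  · subst hmn
    simp [valDg, FDg]
  · rw [valDg, if_neg hmn, dgL, zl, mapN_eq_range, FDg,
      filter_range_extend _ (min (pd.getD m []).length (pd.getD n []).length) N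
        (le_trans (min_le_left _ _) (hN m hm))
        (fun k hk => by simp only [decide_eq_true_eq] at hk; omega)]
    refine congrArg _ (List.filter_congr fun k hk => ?_)
    have hkm := List.mem_range.mp hk
    have h1 : k < (pd.getD m []).length := by omega
    have h2 : k < (pd.getD n []).length := by omega
    simp [h1, h2, beq_eq_decide]

-- every row is bounded by max_len
theorem len_le_maxLen (pd : PySem.Dict String (List Int)) (hnd : pd.keys.Nodup) :
    ∀ m ∈ pd.keys, (pd.getD m []).length
      ≤ (PySem.List.maxD (pd.values.map (fun v => (v.length : Int))) (fun x => x) 0).toNat := by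
  have h0 : ∀ y ∈ pd.values.map (fun v => ((v.length : Int))), 0 ≤ y := by
    intro y hy
    rcases List.mem_map.mp hy with ⟨v, _, rfl⟩
    positivity
  obtain ⟨hL0, hLmax⟩ := maxD_int_bounds _ h0
  intro m hm
  have hv : pd.getD m [] ∈ pd.values := by
    rw [PySem.Dict.values_eq_map_keys pd hnd []]
    exact List.mem_map_of_mem hm
  have := hLmax ((pd.getD m []).length : Int) (List.mem_map_of_mem hv)
  omega

-- ===== VERDICT (by name: the statement is the Claim_ definition above) =====
theorem get_agreement_indices_spec : Claim_equal_get_agreement_indices := by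
  intro preds _ hpre
  unfold Spec_get_agreement_indices
  simp only [get_agreement_indices, get_agreement_indices_alt]
  have hnd : (PySem.Dict.mk preds).keys.Nodup := by
    have hkeq : (PySem.Dict.mk preds).keys = preds.map Prod.fst := rfl
    rw [hkeq]; exact hpre
  rw [A_items (PySem.Dict.mk preds) (PySem.Dict.mk preds).keys hnd,
      B_init (PySem.Dict.mk preds).keys hnd]
  have h0 : ∀ y ∈ (PySem.Dict.mk preds).values.map (fun v => ((v.length : Int))), 0 ≤ y := by
    intro y hy
    rcases List.mem_map.mp hy with ⟨v, _, rfl⟩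
    positivity
  obtain ⟨hL0, _⟩ := maxD_int_bounds _ h0
  have hNat : PySem.List.pyRange 0
      (PySem.List.maxD ((PySem.Dict.mk preds).values.map (fun v => (v.length : Int))) (fun x => x) 0) 1
      = (List.range (PySem.List.maxD ((PySem.Dict.mk preds).values.map (fun v => (v.length : Int)))
          (fun x => x) 0).toNat).map (fun (k : Nat) => (k : Int)) := by
    conv_lhs => rw [← Int.toNat_of_nonneg hL0]
    exact PySem.List.pyRange_zero_natCast _
  rw [hNat, B_loop (PySem.Dict.mk preds) (PySem.Dict.mk preds).keys hnd _]
  rw [grid_congr _ _ _ (valAg_eq_FAg (PySem.Dict.mk preds) hnd _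
        (len_le_maxLen (PySem.Dict.mk preds) hnd)),
      grid_congr _ _ _ (valDg_eq_FDg (PySem.Dict.mk preds) hnd _
        (len_le_maxLen (PySem.Dict.mk preds) hnd))]
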